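-- pv_equiv track=rewrite | github.com/gvarun20/TDDD95 | Exercise 11/squarefieldshard.py | can_cover_with_size
-- ===== SOURCE A (Python) =====
-- def can_cover_with_size(points, k, size):
--
--
--
--
--     n = len(points)
--
--     x_coords = sorted(set(p[0] for p in points))
--     y_coords = sorted(set(p[1] for p in points))
--
--     possible_squares = []
--
--     for x in x_coords:
--
--
--
--         for y in y_coords:
--
--
--
--             square = (x, y, x + size, y + size)
--             possible_squares.append(square)
--
--     coverage = []
--
--
--
--     for square in possible_squares:
--
--
--
--         x1, y1, x2, y2 = square
--         covered_points = 0
--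
--
--
--         for i, (px, py) in enumerate(points):
--
--
--
--             if x1 <= px <= x2 and y1 <= py <= y2:
--                 covered_points |= (1 << i)
--
--
--
--
--         coverage.append(covered_points)
--
--     dp = {}
--     dp[0] = 0
--
--     for mask in range(1 << n):
--
--
--
--
--         if mask not in dp:
--             continue
--
--
--
--         if dp[mask] >= k:
--             continue
--
--
--
--
--         for covered in coverage:
--
--
--
--             new_mask = mask | covered
--
--
--
--             if new_mask not in dp or dp[new_mask] > dp[mask] + 1:
--                 dp[new_mask] = dp[mask] + 1
--
--
--
--
--     all_points_mask = (1 << n) - 1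
--     return all_points_mask in dp and dp[all_points_mask] <= k
-- ===== SOURCE B (Python) =====
-- def _mask(points, x, y, size):
--     m = 0
--     for i, (px, py) in enumerate(points):
--         if x <= px <= x + size and y <= py <= y + size:
--             m |= 1 << i
--     return m
--
--
-- def _solve(coverage, n, u, r):
--     if r < 0:
--         return False
--     if u == 0:
--         return True
--     if r == 0:
--         return False
--     i = next(j for j in range(n) if u & (1 << j))
--     for c in coverage:
--         if c & (1 << i) and _solve(coverage, n, u & ~c, r - 1):
--             return True
--     return False
--
--
-- def can_cover_with_size(points, k, size):
--     n = len(points)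
--     xs = sorted(set(p[0] for p in points))
--     ys = sorted(set(p[1] for p in points))
--     coverage = [_mask(points, x, y, size) for x in xs for y in ys]
--     return _solve(coverage, n, (1 << n) - 1, k)
-- ===== Notes on version B (the rewrite author's own statement) =====
-- stated objective: faster
-- what changed: Replaces A's bottom-up dict DP that enumerates all 2^n bitmasks in numeric order by a recursive decision search that branches on the first uncovered point and decrements the remaining budget, so only reachable uncovered-sets are explored.
import Mathlib
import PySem

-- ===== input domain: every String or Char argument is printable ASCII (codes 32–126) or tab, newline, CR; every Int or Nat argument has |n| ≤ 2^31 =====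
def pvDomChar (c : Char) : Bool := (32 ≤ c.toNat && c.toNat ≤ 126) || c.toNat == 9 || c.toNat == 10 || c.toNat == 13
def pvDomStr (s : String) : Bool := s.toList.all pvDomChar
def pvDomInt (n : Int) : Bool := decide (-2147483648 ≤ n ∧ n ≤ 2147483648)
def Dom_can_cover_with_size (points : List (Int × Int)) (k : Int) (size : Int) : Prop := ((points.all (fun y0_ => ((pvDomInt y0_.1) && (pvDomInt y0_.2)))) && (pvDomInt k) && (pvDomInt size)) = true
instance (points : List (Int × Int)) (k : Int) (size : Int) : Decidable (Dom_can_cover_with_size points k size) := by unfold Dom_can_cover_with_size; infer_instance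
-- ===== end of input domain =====

-- B replaces A's bottom-up dict DP over all 2^n bitmasks by a recursive search that
-- branches on the first uncovered point (objective: faster — it avoids enumerating all subsets).

-- ===== PORT A =====
-- helper: the inner `for (i, (px, py)) in enumerate(points)` loop building one square's coverage mask
-- (index i of enumerate is ≥ 0, so `1 << i` is ported as `1 <<< i.toNat` — exact here)
def pvCoverSq (points : List (Int × Int)) (sq : Int × Int × Int × Int) : Int :=
  (PySem.List.enumerate points 0).foldl
    (fun covered ip =>
      if sq.1 ≤ ip.2.1 ∧ ip.2.1 ≤ sq.2.2.1 ∧ sq.2.1 ≤ ip.2.2 ∧ ip.2.2 ≤ sq.2.2.2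
      then PySem.Int.bor covered (1 <<< ip.1.toNat) else covered) 0

-- helper: body of `for covered in coverage: …` (the relaxation of dp at new_mask)
def pvDpInner (k : Int) (mask : Int) (dp : PySem.Dict Int Int) (c : Int) : PySem.Dict Int Int :=
  let new_mask := PySem.Int.bor mask c
  if ¬ dp.contains new_mask then dp.insert new_mask (dp.getD mask 0 + 1)
  else if dp.getD new_mask 0 > dp.getD mask 0 + 1 then dp.insert new_mask (dp.getD mask 0 + 1)
  else dp

-- helper: body of `for mask in range(1 << n): …`
def pvDpStep (k : Int) (coverage : List Int) (dp : PySem.Dict Int Int) (mask : Int) : PySem.Dict Int Int :=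
  if ¬ dp.contains mask then dp
  else if dp.getD mask 0 ≥ k then dp
  else coverage.foldl (pvDpInner k mask) dp

def can_cover_with_size (points : List (Int × Int)) (k : Int) (size : Int) : Bool :=
  let n := points.length
  let x_coords := PySem.List.sorted (PySem.Set.ofList (points.map (fun p => p.1))) (fun v => v) false
  let y_coords := PySem.List.sorted (PySem.Set.ofList (points.map (fun p => p.2))) (fun v => v) false
  let possible_squares := x_coords.foldl
    (fun acc x => y_coords.foldl (fun acc2 y => acc2 ++ [(x, y, x + size, y + size)]) acc) []
  let coverage := possible_squares.foldl (fun acc sq => acc ++ [pvCoverSq points sq]) []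
  let dp := (PySem.List.pyRange 0 (1 <<< n) 1).foldl (pvDpStep k coverage)
    ((PySem.Dict.empty : PySem.Dict Int Int).insert 0 0)
  let all_points_mask := (1 <<< n) - 1
  match dp.get? all_points_mask with
  | none => false
  | some v => decide (v ≤ k)

-- ===== PORT B =====
-- helper: coverage mask of the square anchored at (x, y) (same enumerate loop as Source B's _mask)
def pvMask (points : List (Int × Int)) (x : Int) (y : Int) (size : Int) : Int :=
  (PySem.List.enumerate points 0).foldl
    (fun m ip =>
      if x ≤ ip.2.1 ∧ ip.2.1 ≤ x + size ∧ y ≤ ip.2.2 ∧ ip.2.2 ≤ y + size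
      then PySem.Int.bor m (1 <<< ip.1.toNat) else m) 0

mutual
  -- Source B's solve(u, r); the `for c in coverage` loop is pvTry (r1 is the already-decremented budget)
  def pvSolve (coverage : List Int) (n : Nat) (u : Int) (r : Int) : Bool :=
    if _h1 : r < 0 then false
    else if _h2 : u = 0 then true
    else if _h3 : r = 0 then false
    else
      match (PySem.List.pyRange 0 (n : Int) 1).find?
          (fun j => decide (PySem.Int.band u (1 <<< j.toNat) ≠ 0)) with
      | none => false  -- unreachable on Source B's calls (u always has a set bit below n there)
      | some i => pvTry coverage coverage n u (r - 1) i
  termination_by (r.toNat, 0)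
  decreasing_by simp_wf; left; omega

  def pvTry (coverage : List Int) (rest : List Int) (n : Nat) (u : Int) (r1 : Int) (i : Int) : Bool :=
    match rest with
    | [] => false
    | c :: cs =>
      if PySem.Int.band c (1 <<< i.toNat) ≠ 0 ∧
          pvSolve coverage n (PySem.Int.band u (Int.not c)) r1 = true then true
      else pvTry coverage cs n u r1 i
  termination_by (r1.toNat, rest.length)
  decreasing_by
  · simp_wf; right; omega
  · simp_wf; right; omega
end

def can_cover_with_size_alt (points : List (Int × Int)) (k : Int) (size : Int) : Bool :=
  let n := points.length
  let xs := PySem.List.sorted (PySem.Set.ofList (points.map (fun p => p.1))) (fun v => v) false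
  let ys := PySem.List.sorted (PySem.Set.ofList (points.map (fun p => p.2))) (fun v => v) false
  let coverage := xs.flatMap (fun x => ys.map (fun y => pvMask points x y size))
  pvSolve coverage n ((1 <<< n) - 1) k

-- ===== PRECONDITION & SPEC =====
def Spec_can_cover_with_size (points : List (Int × Int)) (k : Int) (size : Int) (out : Bool) : Prop := out = can_cover_with_size_alt points k size
instance (points : List (Int × Int)) (k : Int) (size : Int) (out : Bool) : Decidable (Spec_can_cover_with_size points k size out) := by unfold Spec_can_cover_with_size; infer_instance

-- ===== CLAIM (what is proved, stated in full; the proofs are below) =====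
def Claim_equal_can_cover_with_size : Prop := ∀ (points : List (Int × Int)) (k : Int) (size : Int), Dom_can_cover_with_size points k size → Spec_can_cover_with_size points k size (can_cover_with_size points k size)

-- ===== LEMMAS AND PROOFS =====

-- ---- generic bit toolbox (Nat) ----
theorem pv_add_eq_or_of_and_eq_zero (a b : ℕ) (h : a &&& b = 0) : a + b = a ||| b := by
  induction a using Nat.strong_induction_on generalizing b with
  | _ a ih =>
    rcases Nat.eq_zero_or_pos a with h0 | hpos
    · subst h0; simp
    · have hdiv : a / 2 &&& b / 2 = 0 := by
        have := Nat.and_div_two (a := a) (b := b); omega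
      have ih2 := ih (a / 2) (by omega) (b / 2) hdiv
      have hor : (a ||| b) / 2 = a / 2 ||| b / 2 := Nat.or_div_two
      have hb0 : ¬ (a % 2 = 1 ∧ b % 2 = 1) := by
        intro ⟨ha1, hb1⟩
        have : (a &&& b) % 2 = 1 := Nat.and_mod_two_eq_one.mpr ⟨ha1, hb1⟩
        omega
      have hbor : (a ||| b) % 2 = 1 ↔ a % 2 = 1 ∨ b % 2 = 1 := Nat.or_mod_two_eq_one
      omega

theorem pv_sub_and_eq_ldiff (a b : ℕ) : a - (a &&& b) = Nat.ldiff a b := by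
  have h1 : Nat.ldiff a b ||| (a &&& b) = a := by
    apply Nat.eq_of_testBit_eq; intro i
    simp only [Nat.testBit_or, Nat.testBit_ldiff, Nat.testBit_and]
    cases a.testBit i <;> cases b.testBit i <;> rfl
  have h2 : Nat.ldiff a b &&& (a &&& b) = 0 := by
    apply Nat.eq_of_testBit_eq; intro i
    simp only [Nat.testBit_and, Nat.testBit_ldiff, Nat.zero_testBit]
    cases a.testBit i <;> cases b.testBit i <;> rfl
  have h3 := pv_add_eq_or_of_and_eq_zero _ _ h2
  have h4 : a &&& b ≤ a := Nat.and_le_left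
  omega

theorem pv_band_not (a b : ℕ) :
    PySem.Int.band (a : Int) (Int.not (b : Int)) = (Nat.ldiff a b : Int) := by
  have hnot : Int.not (b : Int) = Int.negSucc b := rfl
  rw [hnot]
  have h1 : ¬ (0 : Int) ≤ Int.negSucc b := by simp [Int.negSucc_eq]; omega
  have h2 : (-(Int.negSucc b) - 1).toNat = b := by simp [Int.negSucc_eq]
  simp only [PySem.Int.band, Int.natCast_nonneg, if_pos, if_neg h1, h2, Int.toNat_natCast]
  rw [pv_sub_and_eq_ldiff]

theorem pv_ldiff_ldiff (u a b : ℕ) : Nat.ldiff (Nat.ldiff u a) b = Nat.ldiff u (a ||| b) := by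
  apply Nat.eq_of_testBit_eq; intro i
  simp only [Nat.testBit_ldiff, Nat.testBit_or]
  cases u.testBit i <;> cases a.testBit i <;> cases b.testBit i <;> rfl

theorem pv_ldiff_self (a : ℕ) : Nat.ldiff a a = 0 := by
  apply Nat.eq_of_testBit_eq; intro i
  simp only [Nat.testBit_ldiff, Nat.zero_testBit]
  cases a.testBit i <;> rfl

theorem pv_zero_ldiff (a : ℕ) : Nat.ldiff 0 a = 0 := by
  apply Nat.eq_of_testBit_eq; intro i
  simp [Nat.testBit_ldiff, Nat.zero_testBit]

theorem pv_ldiff_zero (a : ℕ) : Nat.ldiff a 0 = a := by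
  apply Nat.eq_of_testBit_eq; intro i
  simp [Nat.testBit_ldiff, Nat.zero_testBit]

theorem pv_ldiff_le (u a : ℕ) : Nat.ldiff u a ≤ u := by
  apply Nat.le_of_testBit; intro i h
  rw [Nat.testBit_ldiff] at h
  exact (Bool.and_eq_true_iff.mp h).1

theorem pv_ldiff_eq_zero_iff (u v : ℕ) :
    Nat.ldiff u v = 0 ↔ ∀ b, u.testBit b = true → v.testBit b = true := by
  constructor
  · intro h b hb
    have := congrArg (fun x => x.testBit b) h
    simp only [Nat.testBit_ldiff, Nat.zero_testBit, hb, Bool.true_and, Bool.not_eq_false'] at this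
    exact this
  · intro h
    apply Nat.eq_of_testBit_eq; intro i
    simp only [Nat.testBit_ldiff, Nat.zero_testBit]
    rcases hb : u.testBit i with _ | _
    · rfl
    · simp [h i hb]

theorem pv_lt_of_or_ne (a c : ℕ) (h : a ||| c ≠ a) : a < a ||| c := by
  have := Nat.left_le_or (n := a) (m := c)
  omega

theorem pv_band_pow (uN b : ℕ) :
    (PySem.Int.band (uN : Int) (((1 <<< b : ℕ)) : Int) ≠ 0) ↔ uN.testBit b = true := by
  rw [Nat.one_shiftLeft, PySem.Int.band_natCast, Nat.and_two_pow]
  rcases h : uN.testBit b with _ | _ <;> simp [h]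

-- ---- OR of a list of masks ----
def pvOrF (l : List ℕ) : ℕ := l.foldl (fun a c => a ||| c) 0

theorem pvOrF_foldl (l : List ℕ) (a : ℕ) : l.foldl (fun x c => x ||| c) a = a ||| pvOrF l := by
  induction l generalizing a with
  | nil => simp [pvOrF]
  | cons c t ih =>
    show t.foldl (fun x c => x ||| c) (a ||| c) = a ||| pvOrF (c :: t)
    have h1 : pvOrF (c :: t) = c ||| pvOrF t := by
      show t.foldl (fun x c => x ||| c) (0 ||| c) = _
      rw [ih]; simp
    rw [ih, h1, Nat.or_assoc]

theorem pvOrF_nil : pvOrF [] = 0 := rfl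

theorem pvOrF_cons (c : ℕ) (l : List ℕ) : pvOrF (c :: l) = c ||| pvOrF l := by
  show l.foldl (fun x c => x ||| c) (0 ||| c) = _
  rw [pvOrF_foldl]; simp

theorem pvOrF_append_singleton (l : List ℕ) (c : ℕ) : pvOrF (l ++ [c]) = pvOrF l ||| c := by
  induction l with
  | nil => simp [pvOrF_cons, pvOrF]
  | cons d t ih => simp only [List.cons_append, pvOrF_cons, ih, Nat.or_assoc]

theorem pvOrF_testBit (l : List ℕ) (b : ℕ) :
    (pvOrF l).testBit b = l.any (fun c => c.testBit b) := by
  induction l with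
  | nil => simp [pvOrF, Nat.zero_testBit]
  | cons c t ih => simp [pvOrF_cons, Nat.testBit_or, ih]

theorem pvOrF_lt (l : List ℕ) (n : ℕ) (h : ∀ c ∈ l, c < 2 ^ n) : pvOrF l < 2 ^ n := by
  induction l with
  | nil => simpa [pvOrF] using Nat.pos_pow_of_pos n (by omega)
  | cons c t ih =>
    rw [pvOrF_cons]
    exact Nat.or_lt_two_pow (h c (by simp)) (ih (fun c hc => h c (by simp [hc])))

-- ---- chains (DP reachability with all intermediate masks below a processing bound) ----
def pvReachE (cov : List ℕ) (m j : ℕ) : Prop :=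
  ∃ l, (∀ c ∈ l, c ∈ cov) ∧ l.length = j ∧ pvOrF l = m

inductive pvSCB (cov : List ℕ) (t : ℕ) : ℕ → ℕ → Prop
  | base : pvSCB cov t 0 0
  | step (m j c : ℕ) (h : pvSCB cov t m j) (hc : c ∈ cov) (hm : m < t) (hne : m ||| c ≠ m) :
      pvSCB cov t (m ||| c) (j + 1)

theorem pvSCB_self_bound (cov : List ℕ) (s m j : ℕ) (h : pvSCB cov s m j)
    (s' : ℕ) (hs : m ≤ s') : pvSCB cov s' m j := by
  induction h with
  | base => exact pvSCB.base
  | step m j c h hc hm hne ih =>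
    have hlt := pv_lt_of_or_ne m c hne
    exact pvSCB.step m j c (ih (by omega)) hc (by omega) hne

theorem pv_list_to_scb (cov : List ℕ) (n : ℕ) (hcov : ∀ c ∈ cov, c < 2 ^ n)
    (l : List ℕ) (hl : ∀ c ∈ l, c ∈ cov) :
    ∃ j ≤ l.length, pvSCB cov (2 ^ n) (pvOrF l) j := by
  induction l using List.reverseRecOn with
  | nil => exact ⟨0, by simp, pvSCB.base⟩
  | append_singleton t c ih =>
    obtain ⟨j, hj, hscb⟩ := ih (fun d hd => hl d (by simp [hd]))
    rw [pvOrF_append_singleton]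
    by_cases he : pvOrF t ||| c = pvOrF t
    · rw [he]; exact ⟨j, by simp; omega, hscb⟩
    · refine ⟨j + 1, by simp; omega, pvSCB.step _ _ _ hscb (hl c (by simp)) ?_ he⟩
      exact pvOrF_lt t n (fun d hd => hcov d (hl d (by simp [hd])))

-- ---- dictionary invariants for A's DP ----
def pvSND (k : Int) (cov : List ℕ) (dp : PySem.Dict Int Int) : Prop :=
  ∀ m v, dp.get? m = some v → ∃ mN vN : ℕ, m = (mN : Int) ∧ v = (vN : Int) ∧
    pvReachE cov mN vN ∧ ((vN : Int) ≤ k ∨ (mN = 0 ∧ vN = 0))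

def pvCMP (k : Int) (cov : List ℕ) (t : ℕ) (dp : PySem.Dict Int Int) : Prop :=
  ∀ mN jN : ℕ, pvSCB cov t mN jN → (jN : Int) ≤ k →
    ∃ vN : ℕ, vN ≤ jN ∧ dp.get? (mN : Int) = some (vN : Int)

theorem pv_dpinner_step (k : Int) (cov : List ℕ) (tN vt : ℕ) (dp : PySem.Dict Int Int)
    (hSND : pvSND k cov dp) (ht : dp.get? (tN : Int) = some (vt : Int)) (hvt : (vt : Int) < k)
    (cN : ℕ) (hcN : cN ∈ cov) :
    pvSND k cov (pvDpInner k (tN : Int) dp (cN : Int)) ∧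
    (pvDpInner k (tN : Int) dp (cN : Int)).get? (tN : Int) = some (vt : Int) ∧
    (∀ m v, dp.get? m = some v →
      ∃ v', (pvDpInner k (tN : Int) dp (cN : Int)).get? m = some v' ∧ v' ≤ v) ∧
    (∃ w : ℕ, (w : Int) ≤ (vt : Int) + 1 ∧
      (pvDpInner k (tN : Int) dp (cN : Int)).get? ((tN ||| cN : ℕ) : Int) = some (w : Int)) := by
  have hre : pvReachE cov tN vt := by
    obtain ⟨mN', vN', hm', hv', hre', -⟩ := hSND _ _ ht
    have h1 : mN' = tN := by exact_mod_cast hm'.symm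
    have h2 : vN' = vt := by exact_mod_cast hv'.symm
    subst h1; subst h2; exact hre'
  have hreNew : pvReachE cov (tN ||| cN) (vt + 1) := by
    obtain ⟨l, hl, hlen, hor⟩ := hre
    refine ⟨l ++ [cN], ?_, by simp [hlen], by rw [pvOrF_append_singleton, hor]⟩
    intro d hd
    rcases List.mem_append.mp hd with h' | h'
    · exact hl d h'
    · simp at h'; subst h'; exact hcN
  have hgetD : dp.getD (tN : Int) 0 = (vt : Int) := by
    rw [PySem.Dict.getD_eq_get?_getD, ht]; rfl
  have hcast : (vt : Int) + 1 = ((vt + 1 : ℕ) : Int) := by push_cast; ring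
  simp only [pvDpInner, PySem.Int.bor_natCast, hgetD, hcast]
  set key : Int := ((tN ||| cN : ℕ) : Int) with hkey
  by_cases hcon : dp.contains key = true
  · have hcon' := hcon
    rw [PySem.Dict.contains_eq_isSome_get?] at hcon'
    obtain ⟨v0, hv0⟩ := Option.isSome_iff_exists.mp hcon'
    obtain ⟨mN0, w0, hm0, hw0, hre0, hk0⟩ := hSND _ _ hv0
    subst hw0
    have hgd0 : dp.getD key 0 = (w0 : Int) := by rw [PySem.Dict.getD_eq_get?_getD, hv0]; rfl
    rw [if_neg (by simp [hcon]), hgd0]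
    by_cases hgt : (w0 : Int) > ((vt + 1 : ℕ) : Int)
    · rw [if_pos hgt]
      have hkeyne : key ≠ (tN : Int) := by
        intro he
        rw [he, ht] at hv0
        have h3 : (vt : Int) = (w0 : Int) := Option.some.inj hv0
        push_cast at hgt h3
        omega
      refine ⟨?_, ?_, ?_, ?_⟩
      · intro m v h
        rw [PySem.Dict.get?_insert] at h
        by_cases hm : m = key
        · rw [if_pos hm] at h
          have hv : v = ((vt + 1 : ℕ) : Int) := (Option.some.inj h).symm
          exact ⟨tN ||| cN, vt + 1, by rw [hm], hv, hreNew, Or.inl (by push_cast; omega)⟩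
        · rw [if_neg hm] at h; exact hSND _ _ h
      · rw [PySem.Dict.get?_insert, if_neg (Ne.symm hkeyne)]; exact ht
      · intro m v h
        by_cases hm : m = key
        · subst hm
          rw [hv0] at h
          have hv : v = (w0 : Int) := (Option.some.inj h).symm
          refine ⟨((vt + 1 : ℕ) : Int), by rw [PySem.Dict.get?_insert, if_pos rfl], ?_⟩
          rw [hv]; omega
        · exact ⟨v, by rw [PySem.Dict.get?_insert, if_neg hm]; exact h, le_rfl⟩
      · exact ⟨vt + 1, by push_cast; omega, by rw [PySem.Dict.get?_insert, if_pos rfl]⟩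
    · rw [if_neg hgt]
      refine ⟨hSND, ht, fun m v h => ⟨v, h, le_rfl⟩, ⟨w0, ?_, hv0⟩⟩
      push_cast at hgt ⊢
      omega
  · have hnone : dp.get? key = none := by
      rw [PySem.Dict.contains_eq_isSome_get?] at hcon
      exact Option.not_isSome_iff_eq_none.mp (by simpa using hcon)
    rw [if_pos (by simp [hcon])]
    have hkeyne : key ≠ (tN : Int) := by
      intro he; rw [he, ht] at hnone; simp at hnone
    refine ⟨?_, ?_, ?_, ?_⟩
    · intro m v h
      rw [PySem.Dict.get?_insert] at h
      by_cases hm : m = key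
      · rw [if_pos hm] at h
        have hv : v = ((vt + 1 : ℕ) : Int) := (Option.some.inj h).symm
        exact ⟨tN ||| cN, vt + 1, by rw [hm], hv, hreNew, Or.inl (by push_cast; omega)⟩
      · rw [if_neg hm] at h; exact hSND _ _ h
    · rw [PySem.Dict.get?_insert, if_neg (Ne.symm hkeyne)]; exact ht
    · intro m v h
      by_cases hm : m = key
      · subst hm; rw [h] at hnone; simp at hnone
      · exact ⟨v, by rw [PySem.Dict.get?_insert, if_neg hm]; exact h, le_rfl⟩
    · exact ⟨vt + 1, by push_cast; omega, by rw [PySem.Dict.get?_insert, if_pos rfl]⟩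

theorem pv_inner_fold (k : Int) (cov : List ℕ) (tN vt : ℕ) (dp : PySem.Dict Int Int)
    (hSND : pvSND k cov dp) (ht : dp.get? (tN : Int) = some (vt : Int)) (hvt : (vt : Int) < k)
    (cs : List ℕ) (hcs : ∀ c ∈ cs, c ∈ cov) :
    pvSND k cov ((cs.map (fun c : ℕ => (c : Int))).foldl (pvDpInner k (tN : Int)) dp) ∧
    ((cs.map (fun c : ℕ => (c : Int))).foldl (pvDpInner k (tN : Int)) dp).get? (tN : Int) = some (vt : Int) ∧
    (∀ m v, dp.get? m = some v →
      ∃ v', ((cs.map (fun c : ℕ => (c : Int))).foldl (pvDpInner k (tN : Int)) dp).get? m = some v' ∧ v' ≤ v) ∧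
    (∀ c ∈ cs, ∃ w : ℕ, (w : Int) ≤ (vt : Int) + 1 ∧
      ((cs.map (fun c : ℕ => (c : Int))).foldl (pvDpInner k (tN : Int)) dp).get? ((tN ||| c : ℕ) : Int) = some (w : Int)) := by
  induction cs generalizing dp with
  | nil => exact ⟨hSND, ht, fun m v h => ⟨v, h, le_rfl⟩, by simp⟩
  | cons c cs' ih =>
    simp only [List.map_cons, List.foldl_cons]
    obtain ⟨S1, S2, S3, S4⟩ := pv_dpinner_step k cov tN vt dp hSND ht hvt c (hcs c (by simp))
    obtain ⟨F1, F2, F3, F4⟩ := ih (pvDpInner k (tN : Int) dp (c : Int)) S1 S2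
      (fun d hd => hcs d (by simp [hd]))
    refine ⟨F1, F2, ?_, ?_⟩
    · intro m v h
      obtain ⟨v1, h1, le1⟩ := S3 m v h
      obtain ⟨v2, h2, le2⟩ := F3 m v1 h1
      exact ⟨v2, h2, le_trans le2 le1⟩
    · intro d hd
      rcases List.mem_cons.mp hd with h' | h'
      · subst h'
        obtain ⟨w, hw, hkeyv⟩ := S4
        obtain ⟨v2, h2, le2⟩ := F3 _ _ hkeyv
        obtain ⟨mN2, w2, hm2, hv2, -, -⟩ := F1 _ _ h2
        refine ⟨w2, ?_, by rw [h2, hv2]⟩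
        rw [hv2] at le2
        omega
      · exact F4 d h'

theorem pv_outer (k : Int) (cov : List ℕ) (n : ℕ) (hcov : ∀ c ∈ cov, c < 2 ^ n) (t : ℕ)
    (ht : t ≤ 2 ^ n) :
    pvSND k cov ((List.range t).foldl
      (fun dp (j : ℕ) => pvDpStep k (cov.map (fun c : ℕ => (c : Int))) dp (j : Int))
      ((PySem.Dict.empty : PySem.Dict Int Int).insert 0 0)) ∧
    pvCMP k cov t ((List.range t).foldl
      (fun dp (j : ℕ) => pvDpStep k (cov.map (fun c : ℕ => (c : Int))) dp (j : Int))
      ((PySem.Dict.empty : PySem.Dict Int Int).insert 0 0)) := by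
  induction t with
  | zero =>
    simp only [List.range_zero, List.foldl_nil]
    constructor
    · intro m v h
      rw [PySem.Dict.get?_insert] at h
      by_cases hm : m = 0
      · rw [if_pos hm] at h
        refine ⟨0, 0, by rw [hm]; rfl, by rw [← (Option.some.inj h)]; rfl, ⟨[], by simp, rfl, rfl⟩, Or.inr ⟨rfl, rfl⟩⟩
      · rw [if_neg hm] at h
        simp [PySem.Dict.get?_empty] at h
    · intro mN jN hch hk
      cases hch with
      | base =>
        refine ⟨0, le_rfl, ?_⟩
        rw [PySem.Dict.get?_insert, if_pos (by norm_num)]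
        rfl
      | step m j c h hc hm hne => omega
  | succ t iht =>
    obtain ⟨hSND, hCMP⟩ := iht (by omega)
    rw [List.range_succ, List.foldl_append, List.foldl_cons, List.foldl_nil]
    set dpt := (List.range t).foldl
      (fun dp (j : ℕ) => pvDpStep k (cov.map (fun c : ℕ => (c : Int))) dp (j : Int))
      ((PySem.Dict.empty : PySem.Dict Int Int).insert 0 0) with hdpt
    -- a strict chain ending in predecessor t of length j'+1 that stays admissible forces an entry at t
    have hdown : ∀ mN jN, pvSCB cov (t + 1) mN jN → (jN : Int) ≤ k →
        (∃ vN : ℕ, vN ≤ jN ∧ dpt.get? (mN : Int) = some (vN : Int)) ∨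
        (∃ j' c, jN = j' + 1 ∧ c ∈ cov ∧ mN = t ||| c ∧ (t : ℕ) ||| c ≠ t ∧
          pvSCB cov t t j') := by
      intro mN jN hch hk
      cases hch with
      | base => exact Or.inl (hCMP 0 0 pvSCB.base hk)
      | step m j c h hc hm hne =>
        have hpre : pvSCB cov t m j := pvSCB_self_bound cov (t+1) m j h t (by omega)
        by_cases hmt : m < t
        · exact Or.inl (hCMP _ _ (pvSCB.step m j c hpre hc hmt hne) hk)
        · have hmeq : m = t := by omega
          subst hmeq
          exact Or.inr ⟨j, c, rfl, hc, rfl, hne, hpre⟩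
    unfold pvDpStep
    by_cases hcon : dpt.contains (t : Int) = true
    · have hcon' := hcon
      rw [PySem.Dict.contains_eq_isSome_get?] at hcon'
      obtain ⟨v0, hv0⟩ := Option.isSome_iff_exists.mp hcon'
      obtain ⟨mN0, vt, hm0, hw0, hre0, hk0⟩ := hSND _ _ hv0
      subst hw0
      have hgd : dpt.getD (t : Int) 0 = (vt : Int) := by
        rw [PySem.Dict.getD_eq_get?_getD, hv0]; rfl
      rw [if_neg (by simp [hcon]), hgd]
      by_cases hge : (vt : Int) ≥ k
      · rw [if_pos hge]
        refine ⟨hSND, ?_⟩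
        intro mN jN hch hk
        rcases hdown mN jN hch hk with h' | ⟨j', c, hj, hc, hmeq, hne, hpre⟩
        · exact h'
        · obtain ⟨v', hv', hget⟩ := hCMP t j' hpre (by push_cast at hk ⊢; omega)
          rw [hv0] at hget
          have : (v' : Int) = (vt : Int) := (Option.some.inj hget).symm
          have : v' = vt := by exact_mod_cast this
          subst this
          push_cast at hk
          omega
      · rw [if_neg hge]
        obtain ⟨F1, F2, F3, F4⟩ := pv_inner_fold k cov t vt dpt hSND hv0 (by omega) cov (fun d hd => hd)
        refine ⟨F1, ?_⟩
        intro mN jN hch hk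
        rcases hdown mN jN hch hk with ⟨v', hv', hget⟩ | ⟨j', c, hj, hc, hmeq, hne, hpre⟩
        · obtain ⟨v2, h2, le2⟩ := F3 _ _ hget
          obtain ⟨mN2, w2, hm2, hv2, -, -⟩ := F1 _ _ h2
          refine ⟨w2, ?_, by rw [h2, hv2]⟩
          rw [hv2] at le2
          have : (w2 : Int) ≤ (v' : Int) := le2
          have h3 : w2 ≤ v' := by exact_mod_cast this
          omega
        · obtain ⟨v', hv', hget⟩ := hCMP t j' hpre (by push_cast at hk ⊢; omega)
          rw [hv0] at hget
          have he1 : (v' : Int) = (vt : Int) := (Option.some.inj hget).symm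
          have he2 : v' = vt := by exact_mod_cast he1
          subst he2
          obtain ⟨w, hw, hkeyv⟩ := F4 c hc
          subst hj
          subst hmeq
          refine ⟨w, ?_, hkeyv⟩
          push_cast at hw
          omega
    · rw [if_pos (by simp [hcon])]
      refine ⟨hSND, ?_⟩
      intro mN jN hch hk
      rcases hdown mN jN hch hk with h' | ⟨j', c, hj, hc, hmeq, hne, hpre⟩
      · exact h'
      · obtain ⟨v', hv', hget⟩ := hCMP t j' hpre (by push_cast at hk ⊢; omega)
        exfalso
        rw [PySem.Dict.contains_eq_isSome_get?, hget] at hcon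
        simp at hcon

-- ---- B's search: soundness and completeness ----
theorem pvTry_eq_any (cov rest : List Int) (n : Nat) (u : Int) (r1 : Int) (i : Int) :
    pvTry cov rest n u r1 i = rest.any (fun c => decide (PySem.Int.band c (1 <<< i.toNat) ≠ 0) &&
      pvSolve cov n (PySem.Int.band u (Int.not c)) r1) := by
  induction rest with
  | nil => rw [pvTry]; rfl
  | cons c cs ih =>
    rw [pvTry, List.any_cons, ← ih]
    by_cases h : PySem.Int.band c (1 <<< i.toNat) ≠ 0 ∧
        pvSolve cov n (PySem.Int.band u (Int.not c)) r1 = true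
    · simp [h.1, h.2]
    · rw [if_neg h]
      rcases Decidable.not_and_iff_not_or_not.mp h with h1 | h2
      · simp at h1; simp [h1]
      · simp at h2; simp [h2]

theorem pv_solve_base (cov : List ℕ) (n : ℕ) (r : Int) (hr : r ≤ 0) (uN : ℕ) :
    pvSolve (cov.map (fun c : ℕ => (c : Int))) n (uN : Int) r = true ↔
      ∃ l, (∀ c ∈ l, c ∈ cov) ∧ (l.length : Int) ≤ r ∧ Nat.ldiff uN (pvOrF l) = 0 := by
  rw [pvSolve]
  by_cases h1 : r < 0
  · rw [dif_pos h1]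
    constructor
    · intro h; exact absurd h (by simp)
    · rintro ⟨l, -, hlen, -⟩
      have : (0 : Int) ≤ (l.length : Int) := by exact_mod_cast Nat.zero_le _
      omega
  · have hr0 : r = 0 := by omega
    subst hr0
    rw [dif_neg h1]
    by_cases h2 : (uN : Int) = 0
    · rw [dif_pos h2]
      have huN : uN = 0 := by exact_mod_cast h2
      subst huN
      constructor
      · intro _
        exact ⟨[], by simp, by simp, pv_zero_ldiff _⟩
      · intro _; rfl
    · rw [dif_neg h2, dif_pos rfl]
      constructor
      · intro h; exact absurd h (by simp)
      · rintro ⟨l, -, hlen, hld⟩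
        have hl0 : l = [] := by
          cases l with
          | nil => rfl
          | cons c t => simp at hlen; omega
        subst hl0
        rw [pvOrF_nil, pv_ldiff_zero] at hld
        exact absurd hld (by exact_mod_cast h2)

theorem pv_solve_iff (cov : List ℕ) (n : ℕ) (hcov : ∀ c ∈ cov, c < 2 ^ n)
    (r : Int) (uN : ℕ) (hu : uN < 2 ^ n) :
    pvSolve (cov.map (fun c : ℕ => (c : Int))) n (uN : Int) r = true ↔
      ∃ l, (∀ c ∈ l, c ∈ cov) ∧ (l.length : Int) ≤ r ∧ Nat.ldiff uN (pvOrF l) = 0 := by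
  suffices H : ∀ f : ℕ, ∀ r : Int, r.toNat ≤ f → ∀ uN : ℕ, uN < 2 ^ n →
      (pvSolve (cov.map (fun c : ℕ => (c : Int))) n (uN : Int) r = true ↔
        ∃ l, (∀ c ∈ l, c ∈ cov) ∧ (l.length : Int) ≤ r ∧ Nat.ldiff uN (pvOrF l) = 0) by
    exact H r.toNat r le_rfl uN hu
  intro f
  induction f with
  | zero =>
    intro r hr uN hu
    exact pv_solve_base cov n r (by omega) uN
  | succ f ih =>
    intro r hr uN hu
    by_cases hrpos : r ≤ 0
    · exact pv_solve_base cov n r hrpos uN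
    · push_neg at hrpos
      rw [pvSolve, dif_neg (by omega), ]
      by_cases hu0 : uN = 0
      · subst hu0
        rw [dif_pos (by norm_num)]
        constructor
        · intro _
          exact ⟨[], by simp, by simp; omega, pv_zero_ldiff _⟩
        · intro _; rfl
      · rw [dif_neg (by exact_mod_cast hu0), dif_neg (by omega)]
        obtain ⟨b, hb⟩ : ∃ b, uN.testBit b = true := Nat.exists_testBit_of_ne_zero hu0
        have hbn : b < n := by
          have hge : 2 ^ b ≤ uN := Nat.ge_two_pow_of_testBit hb
          by_contra hc
          push_neg at hc
          have : (2 : ℕ) ^ n ≤ 2 ^ b := Nat.pow_le_pow_right (by omega) hc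
          omega
        have hmem : ((b : Int)) ∈ PySem.List.pyRange 0 (n : Int) 1 :=
          (PySem.List.mem_pyRange_one).mpr ⟨by positivity, by exact_mod_cast hbn⟩
        have hPb : (fun (j : Int) => decide (PySem.Int.band (uN : Int) (1 <<< j.toNat) ≠ 0)) (b : Int) = true := by
          simp only [Int.toNat_natCast, decide_eq_true_eq]
          exact (pv_band_pow uN b).mpr hb
        have hsome : ((PySem.List.pyRange 0 (n : Int) 1).find?
            (fun j => decide (PySem.Int.band (uN : Int) (1 <<< j.toNat) ≠ 0))).isSome := by
          rw [List.find?_isSome]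
          exact ⟨(b : Int), hmem, hPb⟩
        obtain ⟨i, hfind⟩ := Option.isSome_iff_exists.mp hsome
        rw [hfind]
        dsimp only
        have hPi := List.find?_some hfind
        have hiMem := List.mem_of_find?_eq_some hfind
        rw [PySem.List.mem_pyRange_one] at hiMem
        obtain ⟨hi0, hiN⟩ := hiMem
        set iN := i.toNat with hiNdef
        have hicast : i = (iN : Int) := by omega
        have hbitI : uN.testBit iN = true := by
          rw [decide_eq_true_eq] at hPi
          exact (pv_band_pow uN iN).mp hPi
        rw [pvTry_eq_any, List.any_eq_true]
        constructor
        · rintro ⟨cI, hcmem, hc⟩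
          obtain ⟨cN, hcNmem, rfl⟩ := List.mem_map.mp hcmem
          rw [Bool.and_eq_true, decide_eq_true_eq] at hc
          obtain ⟨hcbit, hcsolve⟩ := hc
          rw [pv_band_not] at hcsolve
          have ihr := ih (r - 1) (by omega) (Nat.ldiff uN cN)
            (lt_of_le_of_lt (pv_ldiff_le _ _) hu)
          obtain ⟨l', hl', hlen', hld'⟩ := ihr.mp hcsolve
          refine ⟨cN :: l', ?_, ?_, ?_⟩
          · intro d hd
            rcases List.mem_cons.mp hd with h' | h'
            · subst h'; exact hcNmem
            · exact hl' d h'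
          · simp only [List.length_cons]; push_cast; omega
          · rw [pvOrF_cons, ← pv_ldiff_ldiff]; exact hld'
        · rintro ⟨l, hl, hlen, hld⟩
          have horbit : (pvOrF l).testBit iN = true :=
            (pv_ldiff_eq_zero_iff _ _).mp hld iN hbitI
          rw [pvOrF_testBit, List.any_eq_true] at horbit
          obtain ⟨c0, hc0l, hc0bit⟩ := horbit
          refine ⟨(c0 : Int), List.mem_map.mpr ⟨c0, hl c0 hc0l, rfl⟩, ?_⟩
          rw [Bool.and_eq_true, decide_eq_true_eq]
          constructor
          · rw [hicast, Int.toNat_natCast]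
            exact (pv_band_pow c0 iN).mpr hc0bit
          · rw [pv_band_not]
            apply (ih (r - 1) (by omega) (Nat.ldiff uN c0)
              (lt_of_le_of_lt (pv_ldiff_le _ _) hu)).mpr
            refine ⟨l.erase c0, ?_, ?_, ?_⟩
            · intro d hd; exact hl d (List.mem_of_mem_erase hd)
            · have h1 := List.length_erase_of_mem hc0l
              have h2 : 1 ≤ l.length := List.length_pos_of_mem hc0l
              rw [h1]; push_cast [h2]; omega
            · rw [pv_ldiff_ldiff]
              apply (pv_ldiff_eq_zero_iff _ _).mpr
              intro b' hb'
              have h2 : (pvOrF l).testBit b' = true := (pv_ldiff_eq_zero_iff _ _).mp hld b' hb'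
              rw [pvOrF_testBit, List.any_eq_true] at h2
              obtain ⟨d, hdl, hdbit⟩ := h2
              have hperm := List.perm_cons_erase hc0l
              have hdm : d ∈ c0 :: l.erase c0 := hperm.subset hdl
              rw [Nat.testBit_or]
              rcases List.mem_cons.mp hdm with h' | h'
              · subst h'; simp [hdbit]
              · have : (pvOrF (l.erase c0)).testBit b' = true := by
                  rw [pvOrF_testBit, List.any_eq_true]
                  exact ⟨d, h', hdbit⟩
                simp [this]

-- ---- glue ----
theorem pv_coverage_eq (points : List (Int × Int)) (size : Int) (xs ys : List Int) :
    (xs.foldl (fun acc x => ys.foldl (fun acc2 y => acc2 ++ [(x, y, x + size, y + size)]) acc)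
        ([] : List (Int × Int × Int × Int))).foldl (fun acc sq => acc ++ [pvCoverSq points sq]) [] =
      xs.flatMap (fun x => ys.map (fun y => pvMask points x y size)) := by
  simp only [PySem.List.foldl_append_singleton_eq_map]
  simp only [PySem.List.foldl_append_eq_flatMap, List.nil_append]
  rw [List.map_flatMap]
  congr 1
  funext a
  rw [List.map_map]
  apply List.map_congr_left
  intro b _
  rfl

theorem pv_mask_bound (points : List (Int × Int)) (x y size : Int) :
    ∃ cN : ℕ, cN < 2 ^ points.length ∧ pvMask points x y size = (cN : Int) := by
  have H : ∀ l : List (Int × Int × Int),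
      (∀ ip ∈ l, ∃ kk : ℕ, ip.1 = (kk : Int) ∧ kk < points.length) →
      ∀ aN : ℕ, aN < 2 ^ points.length →
      ∃ cN : ℕ, cN < 2 ^ points.length ∧
        l.foldl (fun m ip =>
          if x ≤ ip.2.1 ∧ ip.2.1 ≤ x + size ∧ y ≤ ip.2.2 ∧ ip.2.2 ≤ y + size
          then PySem.Int.bor m (1 <<< ip.1.toNat) else m) (aN : Int) = (cN : Int) := by
    intro l
    induction l with
    | nil => intro _ aN haN; exact ⟨aN, haN, rfl⟩
    | cons ip t ih =>
      intro hmem aN haN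
      simp only [List.foldl_cons]
      by_cases hcond : x ≤ ip.2.1 ∧ ip.2.1 ≤ x + size ∧ y ≤ ip.2.2 ∧ ip.2.2 ≤ y + size
      · rw [if_pos hcond]
        obtain ⟨kk, hk1, hk2⟩ := hmem ip (by simp)
        have hsh : (((1 <<< ip.1.toNat : ℕ)) : Int) = (((1 <<< kk : ℕ)) : Int) := by
          rw [hk1, Int.toNat_natCast]
        rw [hsh, PySem.Int.bor_natCast]
        apply ih (fun q hq => hmem q (by simp [hq]))
        rw [Nat.one_shiftLeft]
        exact Nat.or_lt_two_pow haN
          (Nat.pow_lt_pow_right (by omega) hk2)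
      · rw [if_neg hcond]
        exact ih (fun q hq => hmem q (by simp [hq])) aN haN
  have happ := H (PySem.List.enumerate points 0) ?_ 0 (Nat.two_pow_pos _)
  · exact happ
  · intro ip hip
    rw [PySem.List.mem_enumerate_iff] at hip
    obtain ⟨kk, hkk, hp⟩ := hip
    exact ⟨kk, by rw [hp]; simp, hkk⟩

-- ===== VERDICT (by name: the statement is the Claim_ definition above) =====
theorem can_cover_with_size_spec : Claim_equal_can_cover_with_size := by
  intro points k size _dom
  unfold Spec_can_cover_with_size can_cover_with_size can_cover_with_size_alt
  dsimp only
  rw [pv_coverage_eq points size]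
  set N := points.length with hN
  set covB := (PySem.List.sorted (PySem.Set.ofList (points.map (fun p => p.1))) (fun v => v) false).flatMap
      (fun x => (PySem.List.sorted (PySem.Set.ofList (points.map (fun p => p.2))) (fun v => v) false).map
        (fun y => pvMask points x y size)) with hcovB
  have hbound : ∀ c ∈ covB, ∃ cN : ℕ, cN < 2 ^ N ∧ c = (cN : Int) := by
    intro c hc
    rw [hcovB, List.mem_flatMap] at hc
    obtain ⟨a, -, hc2⟩ := hc
    rw [List.mem_map] at hc2
    obtain ⟨b, -, rfl⟩ := hc2
    obtain ⟨cN, h1, h2⟩ := pv_mask_bound points a b size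
    exact ⟨cN, h1, h2⟩
  set covN := covB.map Int.toNat with hcovN'
  have hform : covB = covN.map (fun c : ℕ => (c : Int)) := by
    rw [hcovN', List.map_map]
    conv_lhs => rw [← List.map_id covB]
    apply List.map_congr_left
    intro c hc
    obtain ⟨cN, -, hc2⟩ := hbound c hc
    simp [Function.comp, hc2]
  have hcovN : ∀ c ∈ covN, c < 2 ^ N := by
    intro c hc
    rw [hcovN', List.mem_map] at hc
    obtain ⟨d, hd, rfl⟩ := hc
    obtain ⟨cN, h1, h2⟩ := hbound d hd
    rw [h2, Int.toNat_natCast]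
    exact h1
  have hone : (1 : ℕ) ≤ 2 ^ N := Nat.one_le_two_pow
  have hr : PySem.List.pyRange 0 (((1 <<< N : ℕ)) : Int) 1 =
      (List.range (2 ^ N)).map (fun (j : ℕ) => (j : Int)) := by
    rw [PySem.List.pyRange_one]
    have h1 : ((((1 <<< N : ℕ)) : Int) - 0).toNat = 2 ^ N := by
      rw [Nat.one_shiftLeft]; omega
    rw [h1]
    apply List.map_congr_left
    intro j _
    omega
  have hmask : (((1 <<< N : ℕ)) : Int) - 1 = (((2 ^ N - 1 : ℕ)) : Int) := by
    rw [Nat.one_shiftLeft, Nat.cast_sub hone]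
    simp
  rw [hform, hr, hmask, List.foldl_map]
  rw [show ((1 <<< N - 1 : ℕ) : Int) = (((2 ^ N - 1 : ℕ)) : Int) from by rw [Nat.one_shiftLeft]]
  obtain ⟨hSND, hCMP⟩ := pv_outer k covN N hcovN (2 ^ N) le_rfl
  have hu : 2 ^ N - 1 < 2 ^ N := by omega
  have hiff := pv_solve_iff covN N hcovN k (2 ^ N - 1) hu
  have hfull : ∀ l, (∀ c ∈ l, c ∈ covN) → Nat.ldiff (2 ^ N - 1) (pvOrF l) = 0 →
      pvOrF l = 2 ^ N - 1 := by
    intro l hl hld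
    have horlt : pvOrF l < 2 ^ N := pvOrF_lt l N (fun c hc => hcovN c (hl c hc))
    apply Nat.eq_of_testBit_eq
    intro b
    by_cases hbN : b < N
    · have h1 : (2 ^ N - 1 : ℕ).testBit b = true := by
        rw [Nat.testBit_two_pow_sub_one]; simp [hbN]
      have h2 := (pv_ldiff_eq_zero_iff _ _).mp hld b h1
      rw [h1, h2]
    · have h1 : (2 ^ N - 1 : ℕ).testBit b = false := by
        rw [Nat.testBit_two_pow_sub_one]; simp [hbN]
      have h2 : (pvOrF l).testBit b = false :=
        Nat.testBit_eq_false_of_lt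
          (lt_of_lt_of_le horlt (Nat.pow_le_pow_right (by omega) (by omega)))
      rw [h1, h2]
  cases hdp : ((List.range (2 ^ N)).foldl
      (fun dp (j : ℕ) => pvDpStep k (covN.map (fun c : ℕ => (c : Int))) dp (j : Int))
      ((PySem.Dict.empty : PySem.Dict Int Int).insert 0 0)).get? (((2 ^ N - 1 : ℕ)) : Int) with
  | none =>
    rcases hb : pvSolve (covN.map (fun c : ℕ => (c : Int))) N (((2 ^ N - 1 : ℕ)) : Int) k with _ | _
    · rfl
    · exfalso
      obtain ⟨l, hl, hlen, hld⟩ := hiff.mp hb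
      have horf := hfull l hl hld
      obtain ⟨j, hj, hscb⟩ := pv_list_to_scb covN N hcovN l hl
      rw [horf] at hscb
      obtain ⟨vN, -, hget⟩ := hCMP _ _ hscb (le_trans (by exact_mod_cast hj) hlen)
      rw [hdp] at hget
      simp at hget
  | some v =>
    obtain ⟨mN, vN, hmN, hvN, hre, -⟩ := hSND _ _ hdp
    have hmN2 : mN = 2 ^ N - 1 := by exact_mod_cast hmN.symm
    subst hmN2
    subst hvN
    by_cases hvk : (vN : Int) ≤ k
    · have htrue : pvSolve (covN.map (fun c : ℕ => (c : Int))) N (((2 ^ N - 1 : ℕ)) : Int) k = true := by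
        apply hiff.mpr
        obtain ⟨l, hl, hlen, horf⟩ := hre
        exact ⟨l, hl, by rw [hlen]; exact hvk, by rw [horf, pv_ldiff_self]⟩
      rw [htrue]
      simp [hvk]
    · have hfalse : pvSolve (covN.map (fun c : ℕ => (c : Int))) N (((2 ^ N - 1 : ℕ)) : Int) k = false := by
        rcases hb : pvSolve (covN.map (fun c : ℕ => (c : Int))) N (((2 ^ N - 1 : ℕ)) : Int) k with _ | _
        · rfl
        · exfalso
          obtain ⟨l, hl, hlen, hld⟩ := hiff.mp hb
          have horf := hfull l hl hld
          obtain ⟨j, hj, hscb⟩ := pv_list_to_scb covN N hcovN l hl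
          rw [horf] at hscb
          have hjk : (j : Int) ≤ k := le_trans (by exact_mod_cast hj) hlen
          obtain ⟨v2, hv2le, hget⟩ := hCMP _ _ hscb hjk
          rw [hdp] at hget
          have he1 : (vN : Int) = (v2 : Int) := Option.some.inj hget
          have he2 : vN = v2 := by exact_mod_cast he1
          apply hvk
          rw [he2]
          have : (v2 : Int) ≤ (j : Int) := by exact_mod_cast hv2le
          omega
      rw [hfalse]
      simp [hvk]
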